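-- pv_equiv track=rewrite | github.com/woobni/Coding-Test | baekjoon/candyGame.py | check
-- ===== SOURCE A (Python) =====
-- def check(n, arr):
--     answer=1
--     for i in range(n):
--         # 열 순회하면서 연속되는 숫자 세기
--         cnt=1
--         for j in range(1, n):
--             if arr[i][j] == arr[i][j-1]:
--                 # 이전 것과 같다면 +1
--                 cnt += 1
--             else:
--                 # 이전과 다르면 1로 초기화
--                 cnt=1
--
--             # 현재 cnt가 크다면 answer 갱신
--             if cnt > answer:
--                 answer=cnt
--
--         # 행 순회하면서 연속되는 숫자 세기
--         cnt=1
--         for j in range(1, n):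
--             if arr[j][i] == arr[j-1][i]:
--                 # 이전 것과 같다면 +1
--                 cnt += 1
--             else:
--                 # 이전과 다르면 1로 초기화
--                 cnt=1
--
--             # 현재 cnt가 크다면 answer 갱신
--             if cnt > answer:
--                 answer=cnt
--
--     return answer
-- ===== SOURCE B (Python) =====
-- def check(n, arr):
--     # Binary-search the answer: "some row or column contains a constant
--     # window of length L" is monotone in L, so the longest run is the
--     # largest feasible L in [1, n].
--     if n <= 0:
--         return 1
--     grid = [row[:n] for row in arr[:n]]
--     lines = grid + [list(c) for c in zip(*grid)]
--
--     def feasible(L):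
--         return any(line[j:j + L] == [line[j]] * L
--                    for line in lines
--                    for j in range(len(line) - L + 1))
--
--     lo, hi = 1, n
--     while lo < hi:
--         mid = (lo + hi + 1) // 2
--         if feasible(mid):
--             lo = mid
--         else:
--             hi = mid - 1
--     return lo
-- ===== Notes on version B (the rewrite author's own statement) =====
-- stated objective: alternative
-- what changed: Replaces A's reset-counter scan over rows and columns by binary search on the answer length L, deciding feasibility of each L by testing whether any row/column contains a constant window of length L (slice-vs-replicate comparison); no running counter or adjacent-pair pass remains.
import Mathlib
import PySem

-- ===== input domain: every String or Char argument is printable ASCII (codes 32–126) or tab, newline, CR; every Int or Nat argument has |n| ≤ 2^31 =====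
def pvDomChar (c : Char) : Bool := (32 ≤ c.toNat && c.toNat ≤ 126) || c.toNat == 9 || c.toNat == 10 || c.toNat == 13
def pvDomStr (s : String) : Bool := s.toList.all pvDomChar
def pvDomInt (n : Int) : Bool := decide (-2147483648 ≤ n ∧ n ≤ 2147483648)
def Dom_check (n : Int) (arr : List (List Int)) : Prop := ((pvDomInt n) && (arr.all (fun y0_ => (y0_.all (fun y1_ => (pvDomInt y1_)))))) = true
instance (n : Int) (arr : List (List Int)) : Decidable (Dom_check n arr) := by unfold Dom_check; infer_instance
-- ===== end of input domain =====

-- B replaces A's reset-counter scans by binary search on the answer length, deciding each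
-- candidate length by a constant-window (slice = replicate) test over rows and columns
-- (objective: alternative algorithm; not faster).

-- ===== PORT A =====
def check (n : Int) (arr : List (List Int)) : Int :=
  (PySem.List.pyRange 0 n).foldl (fun answer i =>
    -- row pass: arr[i][j] vs arr[i][j-1], state (cnt, answer)
    let s1 := (PySem.List.pyRange 1 n).foldl (fun (s : Int × Int) j =>
      let cnt := if PySem.List.pyGetD (PySem.List.pyGetD arr i []) j 0
                  = PySem.List.pyGetD (PySem.List.pyGetD arr i []) (j-1) 0 then s.1 + 1 else 1
      (cnt, if cnt > s.2 then cnt else s.2)) (1, answer)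
    -- column pass: arr[j][i] vs arr[j-1][i]
    ((PySem.List.pyRange 1 n).foldl (fun (s : Int × Int) j =>
      let cnt := if PySem.List.pyGetD (PySem.List.pyGetD arr j []) i 0
                  = PySem.List.pyGetD (PySem.List.pyGetD arr (j-1) []) i 0 then s.1 + 1 else 1
      (cnt, if cnt > s.2 then cnt else s.2)) (1, s1.2)).2) 1

-- ===== PORT B =====
-- feasible(L): some row/column line has a constant window of length L
-- (Python: line[j:j+L] == [line[j]] * L; line[j] is in range for every j the range yields)
def feasibleB (lines : List (List Int)) (L : Int) : Bool :=
  lines.any (fun line =>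
    (PySem.List.pyRange 0 ((line.length : Int) - L + 1)).any (fun j =>
      PySem.List.slice line (some j) (some (j + L))
        == List.replicate L.toNat (PySem.List.pyGetD line j 0)))

-- midpoint bounds for the while-loop's termination (cited by decreasing_by)
theorem bsearch_mid_bounds (lo hi : Int) (h : lo < hi) :
    lo < PySem.Int.floordiv (lo + hi + 1) 2 ∧ PySem.Int.floordiv (lo + hi + 1) 2 ≤ hi := by
  have he : PySem.Int.floordiv (lo + hi + 1) 2 = (lo + hi + 1) / 2 :=
    PySem.Int.floordiv_eq_ediv_of_pos (by omega)
  omega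

-- the while lo < hi loop of Source B
def bsearchB (lines : List (List Int)) (lo hi : Int) : Int :=
  if h : lo < hi then
    let mid := PySem.Int.floordiv (lo + hi + 1) 2
    if feasibleB lines mid then bsearchB lines mid hi else bsearchB lines lo (mid - 1)
  else lo
termination_by (hi - lo).toNat
decreasing_by
  · have := bsearch_mid_bounds lo hi h; omega
  · have := bsearch_mid_bounds lo hi h; omega

theorem zipStar_measure (rows : List (List Int)) (h : ¬(rows.isEmpty || rows.any (·.isEmpty))) :
    ((rows.map (fun r => r.tail)).map List.length).sum < (rows.map List.length).sum := by
  simp only [Bool.or_eq_true, not_or, List.isEmpty_iff, List.any_eq_true] at h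
  obtain ⟨h1, h2⟩ := h
  induction rows with
  | nil => simp at h1
  | cons r rs ih =>
    simp only [List.map_cons, List.sum_cons]
    have hr : r ≠ [] := by intro hh; exact h2 ⟨r, by simp [hh]⟩
    have : r.tail.length < r.length := by
      cases r with | nil => exact absurd rfl hr | cons a t => simp
    cases rs with
    | nil => simpa using this
    | cons r2 rs2 =>
      have := ih (by simp) (by intro ⟨x, hx, he⟩; exact h2 ⟨x, by simp [hx], he⟩)
      omega

-- zip(*grid): truncates at the shortest row; zip() of no arguments is empty
def zipStar (rows : List (List Int)) : List (List Int) :=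
  if _h : rows.isEmpty || rows.any (·.isEmpty) then []
  else (rows.map (fun r => r.headD 0)) :: zipStar (rows.map (fun r => r.tail))
termination_by (rows.map List.length).sum
decreasing_by simpa using zipStar_measure rows _h

def check_alt (n : Int) (arr : List (List Int)) : Int :=
  if n ≤ 0 then 1
  else
    let grid := (PySem.List.slice arr none (some n)).map (fun row => PySem.List.slice row none (some n))
    let lines := grid ++ zipStar grid
    bsearchB lines 1 n

-- ===== PRECONDITION & SPEC =====
-- Pre_ excludes exactly the inputs where A raises IndexError: for n ≥ 2 A indexes arr[i][j]
-- for all 0 ≤ i,j < n, so it needs n rows each of length ≥ n; for n ≤ 1 A indexes nothing.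
def Pre_check (n : Int) (arr : List (List Int)) : Prop :=
  2 ≤ n → (n ≤ arr.length ∧ ∀ row ∈ arr.take n.toNat, n ≤ row.length)
instance (n : Int) (arr : List (List Int)) : Decidable (Pre_check n arr) := by unfold Pre_check; infer_instance

def pvWitness_check : Int × List (List Int) := (2, [[1, 1], [2, 3]])

def Spec_check (n : Int) (arr : List (List Int)) (out : Int) : Prop := out = check_alt n arr
instance (n : Int) (arr : List (List Int)) (out : Int) : Decidable (Spec_check n arr out) := by unfold Spec_check; infer_instance

-- ===== CLAIM (what is proved, stated in full; the proofs are below) =====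
def Claim_equal_check : Prop := ∀ (n : Int) (arr : List (List Int)), Dom_check n arr → Pre_check n arr → Spec_check n arr (check n arr)

-- ===== LEMMAS AND PROOFS =====

-- canonical run-length decomposition of a line
def runsAux : Int → Int → List Int → List Int
  | _, c, [] => [c]
  | prev, c, x :: xs => if x = prev then runsAux x (c+1) xs else c :: runsAux x 1 xs

def runsOf : List Int → List Int
  | [] => []
  | x :: xs => runsAux x 1 xs

-- longest run of a line (1 for the empty line)
def lineVal (l : List Int) : Int := (runsOf l).foldl max 1

-- A's inner loop, restructured over adjacent pairs
def foldApairs : List Int → Int → Int × Int → Int × Int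
  | [], _, s => s
  | x :: xs, prev, s =>
      let c := if x = prev then s.1 + 1 else 1
      foldApairs xs x (c, max s.2 c)

theorem foldl_max_max (l : List Int) (a b : Int) :
    l.foldl max (max a b) = max a (l.foldl max b) := by
  induction l generalizing b with
  | nil => rfl
  | cons x t ih => simpa [max_assoc] using ih (max b x)

theorem le_foldl_max_runsAux (xs : List Int) (prev c b : Int) :
    c ≤ (runsAux prev c xs).foldl max b := by
  induction xs generalizing prev c b with
  | nil => simp [runsAux]
  | cons x t ih =>
    by_cases h : x = prev
    · simp only [runsAux, if_pos h]
      have := ih x (c+1) b; omega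
    · simp only [runsAux, if_neg h, List.foldl_cons]
      have h1 := (PySem.List.le_foldl_max (runsAux x 1 t) (max b c)).1
      omega

theorem foldApairs_snd (xs : List Int) (prev c a : Int) (hc : 1 ≤ c) (hca : c ≤ a) :
    (foldApairs xs prev (c, a)).2 = max a ((runsAux prev c xs).foldl max 1) := by
  induction xs generalizing prev c a with
  | nil =>
    simp only [foldApairs, runsAux, List.foldl_cons, List.foldl_nil]
    omega
  | cons x t ih =>
    by_cases h : x = prev
    · simp only [foldApairs, runsAux, if_pos h]
      rw [ih x (c+1) (max a (c+1)) (by omega) (by omega)]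
      have := le_foldl_max_runsAux t x (c+1) 1
      omega
    · simp only [foldApairs, runsAux, if_neg h, List.foldl_cons]
      rw [ih x 1 (max a 1) (by omega) (by omega)]
      have h1 : (runsAux x 1 t).foldl max (max 1 c) = max c ((runsAux x 1 t).foldl max 1) := by
        rw [max_comm 1 c, foldl_max_max]
      omega

theorem foldApairs_snd' (L : List Int) (a : Int) (ha : 1 ≤ a) (hL : L ≠ []) :
    (foldApairs L.tail (L.headD 0) (1, a)).2 = max a (lineVal L) := by
  cases L with
  | nil => exact absurd rfl hL
  | cons x xs => simpa [lineVal, runsOf] using foldApairs_snd xs x 1 a (by omega) ha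

-- bridge: A's index fold over range(k, len L) equals foldApairs over drop k
theorem bridge (L : List Int) (k : Nat) (hk : 1 ≤ k) (hkn : k ≤ L.length) (s : Int × Int) :
    (PySem.List.pyRange (k : Int) (L.length : Int)).foldl (fun (s : Int × Int) j =>
        let cnt := if PySem.List.pyGetD L j 0 = PySem.List.pyGetD L (j-1) 0 then s.1 + 1 else 1
        (cnt, if cnt > s.2 then cnt else s.2)) s
      = foldApairs (L.drop k) (L.getD (k-1) 0) s := by
  induction hd : L.length - k generalizing k s with
  | zero =>
    have hk' : L.length = k := by omega
    rw [PySem.List.pyRange_one_eq_nil (by exact_mod_cast hk'.le)]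
    rw [List.drop_eq_nil_of_le (by omega)]
    rfl
  | succ d ih =>
    have hlt : k < L.length := by omega
    rw [PySem.List.pyRange_one_cons (by exact_mod_cast hlt), List.foldl_cons]
    have hcast : (k : Int) + 1 = ((k + 1 : Nat) : Int) := by push_cast; ring
    rw [hcast, ih (k+1) (by omega) (by omega) _ (by omega)]
    rw [List.drop_eq_getElem_cons hlt]
    simp only [foldApairs]
    have e1 : PySem.List.pyGetD L (k : Int) 0 = L[k] := by
      rw [PySem.List.pyGetD_natCast, List.getD_eq_getElem]
    have e2 : PySem.List.pyGetD L ((k : Int) - 1) 0 = L.getD (k-1) 0 := by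
      have : ((k : Int) - 1) = ((k - 1 : Nat) : Int) := by omega
      rw [this, PySem.List.pyGetD_natCast]
    have e3 : L.getD k 0 = L[k] := List.getD_eq_getElem _ _ hlt
    simp only [e1, e2, gt_iff_lt, ← max_def_lt]
    simp only [Nat.add_sub_cancel, e3]

def rowL (arr : List (List Int)) (m : Nat) (i : Int) : List Int := (PySem.List.pyGetD arr i []).take m
def colL (arr : List (List Int)) (n i : Int) : List Int :=
  (PySem.List.pyRange 0 n).map (fun j => PySem.List.pyGetD (PySem.List.pyGetD arr j []) i 0)

theorem rowlen (arr : List (List Int)) (n : Int) (harr : n ≤ (arr.length : Int))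
    (hrows : ∀ row ∈ arr.take n.toNat, n ≤ (row.length : Int))
    (i : Int) (hi0 : 0 ≤ i) (hin : i < n) :
    n ≤ ((PySem.List.pyGetD arr i []).length : Int) := by
  have hlen : i < (arr.length : Int) := lt_of_lt_of_le hin harr
  rw [PySem.List.pyGetD_eq_getElem _ _ hi0 hlen]
  apply hrows
  have hidx : i.toNat < (arr.take n.toNat).length := by simp; omega
  have : arr[i.toNat] = (arr.take n.toNat)[i.toNat] := List.getElem_take.symm
  rw [this]
  exact List.getElem_mem hidx

theorem row_access (R : List Int) (m : Nat) (t : Int) (h0 : 0 ≤ t) (ht : t < (m : Int))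
    (hm : (m : Int) ≤ (R.length : Int)) :
    PySem.List.pyGetD (R.take m) t 0 = PySem.List.pyGetD R t 0 := by
  rw [PySem.List.pyGetD_eq_getElem _ _ h0 (by simp; omega),
      PySem.List.pyGetD_eq_getElem _ _ h0 (by omega)]
  exact List.getElem_take

theorem getD_zero_headD (L : List Int) : L.getD 0 0 = L.headD 0 := by cases L <;> rfl

theorem rowInner (n : Int) (arr : List (List Int)) (harr : n ≤ (arr.length : Int))
    (hrows : ∀ row ∈ arr.take n.toNat, n ≤ (row.length : Int)) (h2 : 2 ≤ n)
    (i : Int) (hi0 : 0 ≤ i) (hin : i < n) (a : Int) (ha : 1 ≤ a) :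
    ((PySem.List.pyRange 1 n).foldl (fun (s : Int × Int) j =>
      let cnt := if PySem.List.pyGetD (PySem.List.pyGetD arr i []) j 0
                  = PySem.List.pyGetD (PySem.List.pyGetD arr i []) (j-1) 0 then s.1 + 1 else 1
      (cnt, if cnt > s.2 then cnt else s.2)) (1, a)).2
      = max a (lineVal (rowL arr n.toNat i)) := by
  have hRlen : n ≤ ((PySem.List.pyGetD arr i []).length : Int) := rowlen arr n harr hrows i hi0 hin
  set L := rowL arr n.toNat i with hLdef
  have hLlen : (L.length : Int) = n := by
    simp only [hLdef, rowL, List.length_take]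
    omega
  have hcongr : (PySem.List.pyRange 1 n).foldl (fun (s : Int × Int) j =>
      let cnt := if PySem.List.pyGetD (PySem.List.pyGetD arr i []) j 0
                  = PySem.List.pyGetD (PySem.List.pyGetD arr i []) (j-1) 0 then s.1 + 1 else 1
      (cnt, if cnt > s.2 then cnt else s.2)) (1, a)
      = (PySem.List.pyRange 1 n).foldl (fun (s : Int × Int) j =>
      let cnt := if PySem.List.pyGetD L j 0 = PySem.List.pyGetD L (j-1) 0 then s.1 + 1 else 1
      (cnt, if cnt > s.2 then cnt else s.2)) (1, a) := by
    apply PySem.List.foldl_congr_mem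
    intro acc j hj
    obtain ⟨hj1, hj2⟩ := PySem.List.mem_pyRange_one.mp hj
    rw [← row_access _ n.toNat j (by omega) (by omega) (by omega),
        ← row_access _ n.toNat (j-1) (by omega) (by omega) (by omega)]
    simp only [hLdef, rowL]
  rw [hcongr, ← hLlen]
  have hb := bridge L 1 (by omega) (by omega) (1, a)
  simp only [Nat.cast_one] at hb
  rw [hb, List.drop_one, getD_zero_headD]
  exact foldApairs_snd' L a ha (by intro hnil; rw [hnil] at hLlen; simp at hLlen; omega)

theorem colInner (n : Int) (arr : List (List Int)) (h2 : 2 ≤ n)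
    (i : Int) (a : Int) (ha : 1 ≤ a) :
    ((PySem.List.pyRange 1 n).foldl (fun (s : Int × Int) j =>
      let cnt := if PySem.List.pyGetD (PySem.List.pyGetD arr j []) i 0
                  = PySem.List.pyGetD (PySem.List.pyGetD arr (j-1) []) i 0 then s.1 + 1 else 1
      (cnt, if cnt > s.2 then cnt else s.2)) (1, a)).2
      = max a (lineVal (colL arr n i)) := by
  set C := colL arr n i with hCdef
  have hClen : (C.length : Int) = n := by
    simp only [hCdef, colL, List.length_map, PySem.List.length_pyRange_one]
    omega
  have hcongr : (PySem.List.pyRange 1 n).foldl (fun (s : Int × Int) j =>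
      let cnt := if PySem.List.pyGetD (PySem.List.pyGetD arr j []) i 0
                  = PySem.List.pyGetD (PySem.List.pyGetD arr (j-1) []) i 0 then s.1 + 1 else 1
      (cnt, if cnt > s.2 then cnt else s.2)) (1, a)
      = (PySem.List.pyRange 1 n).foldl (fun (s : Int × Int) j =>
      let cnt := if PySem.List.pyGetD C j 0 = PySem.List.pyGetD C (j-1) 0 then s.1 + 1 else 1
      (cnt, if cnt > s.2 then cnt else s.2)) (1, a) := by
    apply PySem.List.foldl_congr_mem
    intro acc j hj
    obtain ⟨hj1, hj2⟩ := PySem.List.mem_pyRange_one.mp hj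
    rw [hCdef]
    unfold colL
    rw [PySem.List.pyGetD_map_pyRange_of_nonneg _ n j 0 (by omega) (by omega),
        PySem.List.pyGetD_map_pyRange_of_nonneg _ n (j-1) 0 (by omega) (by omega)]
  rw [hcongr, ← hClen]
  have hb := bridge C 1 (by omega) (by omega) (1, a)
  simp only [Nat.cast_one] at hb
  rw [hb, List.drop_one, getD_zero_headD]
  exact foldApairs_snd' C a ha (by intro hnil; rw [hnil] at hClen; simp at hClen; omega)

theorem grid_eq (arr : List (List Int)) (n : Int) (harr : n ≤ (arr.length : Int)) :
    (arr.take n.toNat).map (fun r => r.take n.toNat)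
      = (PySem.List.pyRange 0 n).map (rowL arr n.toNat) := by
  apply List.ext_getElem
  · simp [PySem.List.length_pyRange_one]; omega
  · intro p h1 h2
    simp only [List.getElem_map, PySem.List.getElem_pyRange_one, zero_add]
    have hp : p < arr.length := by simp at h1; omega
    unfold rowL
    rw [PySem.List.pyGetD_natCast, List.getD_eq_getElem _ _ hp]
    congr 1
    exact List.getElem_take

theorem foldl_pairmax (lineVal : List Int → Int) (idx : List Int) (r c : Int → List Int) (a : Int) :
    idx.foldl (fun b i => max (max b (lineVal (r i))) (lineVal (c i))) a
      = (idx.flatMap (fun i => [r i, c i])).foldl (fun b l => max b (lineVal l)) a := by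
  induction idx generalizing a with
  | nil => rfl
  | cons i t ih => simp only [List.foldl_cons, List.flatMap_cons, List.cons_append,
      List.nil_append, ih]

theorem flatMap_pair_perm (idx : List Int) (r c : Int → List Int) :
    (idx.flatMap fun i => [r i, c i]).Perm (idx.map r ++ idx.map c) := by
  induction idx with
  | nil => simp
  | cons x t ih =>
    simp only [List.flatMap_cons, List.map_cons, List.cons_append]
    refine List.Perm.cons _ ?_
    exact (ih.cons (c x)).trans List.perm_middle.symm

theorem tail_getD (r : List Int) (j : Nat) : r.tail.getD j 0 = r.getD (j+1) 0 := by
  cases r <;> rfl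

theorem zipStar_rect (m : Nat) (g : List (List Int)) (hg : g ≠ [])
    (hlen : ∀ r ∈ g, r.length = m) :
    zipStar g = (List.range m).map (fun j => g.map (fun r => r.getD j 0)) := by
  induction m generalizing g with
  | zero =>
    rw [zipStar]
    have hc : (g.isEmpty || g.any (·.isEmpty)) = true := by
      cases g with
      | nil => simp at hg
      | cons r t =>
        have : r.length = 0 := hlen r (by simp)
        simp [List.eq_nil_of_length_eq_zero this]
    simp [hc]
  | succ m ih =>
    have hne : ¬(g.isEmpty || g.any (·.isEmpty)) = true := by
      simp only [Bool.or_eq_true, List.isEmpty_iff, List.any_eq_true, not_or]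
      constructor
      · exact hg
      · rintro ⟨r, hr, hemp⟩
        have := hlen r hr
        simp [hemp] at this
    rw [zipStar, dif_neg hne]
    rw [ih (g.map (fun r => r.tail)) (by simpa using hg)
        (by rintro r hr; simp only [List.mem_map] at hr; obtain ⟨s, hs, rfl⟩ := hr
            have := hlen s hs; simp [this])]
    rw [List.range_succ_eq_map]
    simp only [List.map_cons, List.map_map, Function.comp_def]
    congr 1
    · apply List.map_congr_left
      intro r hr
      have : r.length = m + 1 := hlen r hr
      cases r with
      | nil => simp at this
      | cons x t => rfl
    · apply List.map_congr_left
      intro j _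
      apply List.map_congr_left
      intro r _
      exact tail_getD r j

theorem cols_eq (arr : List (List Int)) (n : Int) (harr : n ≤ (arr.length : Int))
    (hrows : ∀ row ∈ arr.take n.toNat, n ≤ (row.length : Int)) (h2 : 2 ≤ n) :
    zipStar ((PySem.List.pyRange 0 n).map (rowL arr n.toNat))
      = (PySem.List.pyRange 0 n).map (colL arr n) := by
  rw [zipStar_rect n.toNat _
      (by intro h; have := congrArg List.length h; simp [PySem.List.length_pyRange_one] at this; omega)
      (by rintro r hr; simp only [List.mem_map] at hr; obtain ⟨i, hi, rfl⟩ := hr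
          obtain ⟨hi0, hin⟩ := PySem.List.mem_pyRange_one.mp hi
          have := rowlen arr n harr hrows i hi0 hin
          simp only [rowL, List.length_take]; omega)]
  apply List.ext_getElem
  · simp [PySem.List.length_pyRange_one]
  · intro p h1 h1'
    simp only [List.getElem_map, PySem.List.getElem_pyRange_one, zero_add]
    have hpm : p < n.toNat := by simpa using h1
    unfold colL
    apply List.ext_getElem
    · simp [PySem.List.length_pyRange_one]
    · intro q hq hq'
      simp only [List.getElem_map, PySem.List.getElem_pyRange_one, zero_add, List.getElem_range]
      have hqn : q < n.toNat := by simpa [PySem.List.length_pyRange_one] using hq'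
      have hRlen : n ≤ ((arr.getD q []).length : Int) := by
        have := rowlen arr n harr hrows q (by omega) (by omega)
        rwa [PySem.List.pyGetD_natCast] at this
      unfold rowL
      simp only [PySem.List.pyGetD_natCast]
      rw [List.getD_eq_getElem _ _ (by simp only [List.length_take]; omega)]
      rw [List.getElem_take]
      exact (List.getD_eq_getElem _ _ (by omega)).symm

-- ---- run lengths vs constant windows ----

theorem foldl_max_init_mono (l : List Int) (b b' : Int) (h : b ≤ b') :
    l.foldl max b ≤ l.foldl max b' := by
  induction l generalizing b b' with
  | nil => exact h
  | cons x t ih => exact ih _ _ (by omega)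

theorem runsAux_fold_mono_c (xs : List Int) (prev c c' b : Int) (h : c ≤ c') :
    (runsAux prev c xs).foldl max b ≤ (runsAux prev c' xs).foldl max b := by
  induction xs generalizing prev c c' b with
  | nil => simp only [runsAux, List.foldl_cons, List.foldl_nil]; omega
  | cons x t ih =>
    by_cases hx : x = prev
    · simp only [runsAux, if_pos hx]; exact ih x (c+1) (c'+1) b (by omega)
    · simp only [runsAux, if_neg hx, List.foldl_cons]
      exact foldl_max_init_mono _ _ _ (by omega)

theorem lineVal_cons_ge (x : Int) (xs : List Int) : lineVal xs ≤ lineVal (x :: xs) := by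
  cases xs with
  | nil => simp [lineVal, runsOf, runsAux]
  | cons y t =>
    show (runsAux y 1 t).foldl max 1 ≤ (runsAux x 1 (y :: t)).foldl max 1
    by_cases h : y = x
    · simp only [runsAux, if_pos h]
      exact runsAux_fold_mono_c t y 1 2 1 (by omega)
    · simp only [runsAux, if_neg h, List.foldl_cons, max_self]
      exact le_refl _

theorem lineVal_ge_one (l : List Int) : 1 ≤ lineVal l :=
  (PySem.List.le_foldl_max (runsOf l) 1).1

theorem runsAux_fold_prefix (L : Nat) : ∀ (xs : List Int) (prev c : Int), 1 ≤ c →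
    List.replicate L prev <+: xs → c + (L : Int) ≤ (runsAux prev c xs).foldl max 1 := by
  induction L with
  | zero =>
    intro xs prev c hc _
    simpa using le_foldl_max_runsAux xs prev c 1
  | succ L ih =>
    intro xs prev c hc hp
    obtain ⟨u, hu⟩ := hp
    rw [List.replicate_succ, List.cons_append] at hu
    cases xs with
    | nil => exact absurd hu (by simp)
    | cons x t =>
      obtain ⟨hx, ht⟩ : prev = x ∧ List.replicate L prev ++ u = t := by
        constructor <;> [exact (List.cons.injEq _ _ _ _ ▸ hu).1; exact (List.cons.injEq _ _ _ _ ▸ hu).2]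
      have hstep : runsAux prev c (x :: t) = runsAux x (c+1) t := by
        simp [runsAux, hx.symm]
      rw [hstep, ← hx]
      have := ih t prev (c+1) (by omega) ⟨u, ht⟩
      push_cast at this ⊢
      omega

theorem replicate_infix_le_lineVal (line : List Int) (L : Nat) (v : Int)
    (h : List.replicate L v <:+: line) : (L : Int) ≤ lineVal line := by
  induction line with
  | nil =>
    have := h.length_le
    simp only [List.length_replicate, List.length_nil, Nat.le_zero] at this
    subst this
    have h1 := lineVal_ge_one ([] : List Int)
    push_cast
    omega
  | cons x xs ih =>
    rcases List.infix_cons_iff.mp h with hp | hi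
    · cases L with
      | zero => have := lineVal_ge_one (x :: xs); omega
      | succ L =>
        obtain ⟨u, hu⟩ := hp
        rw [List.replicate_succ, List.cons_append] at hu
        obtain ⟨hv, ht⟩ : v = x ∧ List.replicate L v ++ u = xs := by
          constructor <;> [exact (List.cons.injEq _ _ _ _ ▸ hu).1; exact (List.cons.injEq _ _ _ _ ▸ hu).2]
        have : (1 : Int) + L ≤ (runsAux x 1 xs).foldl max 1 :=
          runsAux_fold_prefix L xs x 1 (by omega) ⟨u, hv ▸ ht⟩
        show ((L : Int) + 1) ≤ (runsAux x 1 xs).foldl max 1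
        omega
    · exact le_trans (ih hi) (lineVal_cons_ge x xs)

theorem runsAux_mem_window (xs : List Int) (prev c : Int) (hc : 1 ≤ c) :
    ∀ r ∈ runsAux prev c xs, ∃ v, List.replicate r.toNat v <:+: (List.replicate c.toNat prev ++ xs) := by
  induction xs generalizing prev c with
  | nil =>
    intro r hr
    simp only [runsAux, List.mem_singleton] at hr
    subst hr
    exact ⟨prev, by simp⟩
  | cons x t ih =>
    intro r hr
    by_cases h : x = prev
    · simp only [runsAux, if_pos h] at hr
      obtain ⟨v, hv⟩ := ih x (c+1) (by omega) r hr
      refine ⟨v, ?_⟩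
      have hrw : List.replicate (c+1).toNat x ++ t = List.replicate c.toNat prev ++ (x :: t) := by
        have : (c+1).toNat = c.toNat + 1 := by omega
        rw [this, List.replicate_succ', h, List.append_assoc, List.singleton_append]
      rwa [hrw] at hv
    · simp only [runsAux, if_neg h, List.mem_cons] at hr
      rcases hr with rfl | hr
      · exact ⟨prev, (List.prefix_append _ _).isInfix⟩
      · obtain ⟨v, hv⟩ := ih x 1 le_rfl r hr
        refine ⟨v, ?_⟩
        have h1 : List.replicate (1:Int).toNat x ++ t = x :: t := by simp
        rw [h1] at hv
        exact hv.trans (List.suffix_append _ _).isInfix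

theorem foldl_max_mem_or (l : List Int) (a : Int) : l.foldl max a ∈ l ∨ l.foldl max a = a := by
  induction l generalizing a with
  | nil => exact Or.inr rfl
  | cons x t ih =>
    rcases ih (max a x) with hm | he
    · exact Or.inl (List.mem_cons_of_mem _ hm)
    · rcases max_choice a x with hc | hc
      · exact Or.inr (by simpa [hc] using he)
      · refine Or.inl ?_
        rw [List.foldl_cons, he, hc]
        exact List.mem_cons_self

theorem lineVal_window (line : List Int) (h : line ≠ []) :
    ∃ v, List.replicate (lineVal line).toNat v <:+: line := by
  cases line with
  | nil => exact absurd rfl h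
  | cons x xs =>
    rcases foldl_max_mem_or (runsOf (x :: xs)) 1 with hm | h1
    · obtain ⟨v, hv⟩ := runsAux_mem_window xs x 1 le_rfl _ hm
      have h1 : List.replicate (1:Int).toNat x ++ xs = x :: xs := by simp
      rw [h1] at hv
      exact ⟨v, hv⟩
    · refine ⟨x, ?_⟩
      have hv : lineVal (x :: xs) = 1 := h1
      rw [hv]
      exact ⟨[], xs, by simp⟩

theorem hasRep_of_le (line : List Int) (L : Nat) (hL : 2 ≤ L)
    (hle : (L : Int) ≤ lineVal line) : ∃ v, List.replicate L v <:+: line := by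
  have hne : line ≠ [] := by
    intro hnil
    rw [hnil] at hle
    have : lineVal ([] : List Int) = 1 := rfl
    omega
  obtain ⟨v, hv⟩ := lineVal_window line hne
  refine ⟨v, ?_⟩
  have hLle : L ≤ (lineVal line).toNat := by omega
  have : List.replicate L v = (List.replicate (lineVal line).toNat v).take L := by
    rw [List.take_replicate, Nat.min_eq_left hLle]
  rw [this]
  exact (List.take_prefix _ _).isInfix.trans hv

-- pyGetD at the start of the replicate block reads its value
theorem getD_block (s t : List Int) (v : Int) (L : Nat) (h : 0 < L) :
    (s ++ (List.replicate L v ++ t)).getD s.length 0 = v := by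
  cases L with
  | zero => omega
  | succ L => simp [List.getD]

-- the per-line window scan of feasibleB, characterised
theorem win_iff (line : List Int) (L : Int) (hL : 2 ≤ L) :
    ((PySem.List.pyRange 0 ((line.length : Int) - L + 1)).any (fun j =>
      PySem.List.slice line (some j) (some (j + L))
        == List.replicate L.toNat (PySem.List.pyGetD line j 0)) = true)
      ↔ (L ≤ lineVal line) := by
  constructor
  · intro h
    obtain ⟨j, hj, hw⟩ := List.any_eq_true.mp h
    obtain ⟨hj0, hjlt⟩ := PySem.List.mem_pyRange_one.mp hj
    rw [beq_iff_eq] at hw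
    have hsl : PySem.List.slice line (some j) (some (j + L))
        = (line.drop j.toNat).take ((j + L).toNat - j.toNat) :=
      PySem.List.slice_toNat line hj0 (by omega)
    have hlen : (j + L).toNat - j.toNat = L.toNat := by omega
    rw [hsl, hlen] at hw
    have hinf : List.replicate L.toNat (PySem.List.pyGetD line j 0) <:+: line := by
      rw [← hw]
      exact ((List.take_prefix _ _).isInfix).trans (List.drop_suffix _ _).isInfix
    have := replicate_infix_le_lineVal line L.toNat _ hinf
    omega
  · intro h
    obtain ⟨v, s, t, hst⟩ := hasRep_of_le line L.toNat (by omega) (by omega)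
    apply List.any_eq_true.mpr
    have hlen : line.length = s.length + L.toNat + t.length := by
      rw [← hst]; simp; omega
    refine ⟨(s.length : Int), ?_, ?_⟩
    · apply PySem.List.mem_pyRange_one.mpr
      constructor
      · omega
      · push_cast [hlen]; omega
    · rw [beq_iff_eq]
      have hLt : (s.length : Int) + L = ((s.length + L.toNat : Nat) : Int) := by push_cast; omega
      rw [hLt, PySem.List.slice_natCast]
      have hassoc : s ++ (List.replicate L.toNat v ++ t) = line := by
        rw [← List.append_assoc]; exact hst
      have hdrop : line.drop s.length = List.replicate L.toNat v ++ t := by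
        rw [← hassoc]; exact List.drop_left
      have hget : PySem.List.pyGetD line (s.length : Int) 0 = v := by
        rw [PySem.List.pyGetD_natCast, ← hassoc]
        exact getD_block s t v L.toNat (by omega)
      rw [hget, hdrop]
      have hsub : s.length + L.toNat - s.length = L.toNat := by omega
      rw [hsub]
      exact List.take_left' (List.length_replicate)

theorem feasible_iff (lines : List (List Int)) (L : Int) (hL : 2 ≤ L) :
    feasibleB lines L = true ↔ ∃ l ∈ lines, L ≤ lineVal l := by
  unfold feasibleB
  rw [List.any_eq_true]
  constructor
  · rintro ⟨line, hmem, hw⟩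
    exact ⟨line, hmem, (win_iff line L hL).mp hw⟩
  · rintro ⟨line, hmem, hle⟩
    exact ⟨line, hmem, (win_iff line L hL).mpr hle⟩

theorem le_foldl_lineVal_iff (lines : List (List Int)) (a L : Int) :
    L ≤ lines.foldl (fun b l => max b (lineVal l)) a ↔ L ≤ a ∨ ∃ l ∈ lines, L ≤ lineVal l := by
  induction lines generalizing a with
  | nil => simp
  | cons x t ih =>
    simp only [List.foldl_cons, ih (max a (lineVal x)), le_max_iff, List.mem_cons]
    constructor
    · rintro ((h | h) | ⟨l, hm, hl⟩)
      · exact Or.inl h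
      · exact Or.inr ⟨x, Or.inl rfl, h⟩
      · exact Or.inr ⟨l, Or.inr hm, hl⟩
    · rintro (h | ⟨l, (rfl | hm), hl⟩)
      · exact Or.inl (Or.inl h)
      · exact Or.inl (Or.inr hl)
      · exact Or.inr ⟨l, hm, hl⟩

theorem foldl_lineVal_le (lines : List (List Int)) (a n : Int) (ha : a ≤ n)
    (h : ∀ l ∈ lines, lineVal l ≤ n) : lines.foldl (fun b l => max b (lineVal l)) a ≤ n := by
  induction lines generalizing a with
  | nil => exact ha
  | cons x t ih =>
    simp only [List.foldl_cons]
    exact ih _ (by have := h x (List.mem_cons_self); omega)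
      (fun l hl => h l (List.mem_cons_of_mem _ hl))

theorem runsAux_fold_le (xs : List Int) (prev c : Int) (hc : 1 ≤ c) :
    (runsAux prev c xs).foldl max 1 ≤ max 1 (c + (xs.length : Int)) := by
  induction xs generalizing prev c with
  | nil => simp only [runsAux, List.foldl_cons, List.foldl_nil]; omega
  | cons x t ih =>
    by_cases h : x = prev
    · simp only [runsAux, if_pos h, List.length_cons]
      have := ih x (c+1) (by omega)
      push_cast at this ⊢
      omega
    · simp only [runsAux, if_neg h, List.foldl_cons, List.length_cons]
      have h1 : (runsAux x 1 t).foldl max (max 1 c) = max c ((runsAux x 1 t).foldl max 1) := by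
        rw [max_comm 1 c, foldl_max_max]
      have := ih x 1 le_rfl
      push_cast at this ⊢
      omega

theorem lineVal_le_length (l : List Int) : lineVal l ≤ max 1 (l.length : Int) := by
  cases l with
  | nil => simp [lineVal, runsOf]
  | cons x xs =>
    have := runsAux_fold_le xs x 1 le_rfl
    show (runsAux x 1 xs).foldl max 1 ≤ _
    simp only [List.length_cons]
    push_cast at this ⊢
    omega

-- binary search returns the largest feasible value, given the exact feasibility bracket
theorem bsearch_eq (lines : List (List Int)) (M : Int) :
    ∀ (k : Nat) (lo hi : Int), (hi - lo).toNat ≤ k → lo ≤ M → M ≤ hi →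
      (∀ L, lo < L → L ≤ hi → (feasibleB lines L = true ↔ L ≤ M)) →
      bsearchB lines lo hi = M := by
  intro k
  induction k with
  | zero =>
    intro lo hi hk h1 h2 _
    rw [bsearchB]
    rw [dif_neg (by omega)]
    omega
  | succ k ih =>
    intro lo hi hk h1 h2 hf
    rw [bsearchB]
    by_cases hlt : lo < hi
    · rw [dif_pos hlt]
      obtain ⟨hm1, hm2⟩ := bsearch_mid_bounds lo hi hlt
      set mid := PySem.Int.floordiv (lo + hi + 1) 2 with hmid
      by_cases hfm : feasibleB lines mid
      · rw [if_pos hfm]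
        have hMle : mid ≤ M := (hf mid hm1 hm2).mp hfm
        exact ih mid hi (by omega) hMle h2 (fun L hL1 hL2 => hf L (by omega) hL2)
      · rw [if_neg hfm]
        have hMlt : ¬ (mid ≤ M) := fun hle => hfm ((hf mid hm1 hm2).mpr hle)
        exact ih lo (mid - 1) (by omega) h1 (by omega)
          (fun L hL1 hL2 => hf L hL1 (by omega))
    · rw [dif_neg hlt]
      omega

-- ===== VERDICT =====
theorem check_spec : Claim_equal_check := by
  intro n arr _dom hpre
  unfold Spec_check
  by_cases hn0 : n ≤ 0
  · unfold check check_alt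
    rw [PySem.List.pyRange_one_eq_nil hn0, if_pos hn0]
    rfl
  · by_cases hn1 : n = 1
    · subst hn1
      have hA : check 1 arr = 1 := by
        unfold check
        rw [show PySem.List.pyRange 1 1 = [] from by decide,
            show PySem.List.pyRange 0 1 = [0] from by decide]
        rfl
      have hB : check_alt 1 arr = 1 := by
        unfold check_alt
        rw [if_neg (by norm_num)]
        rw [bsearchB]
        norm_num
      rw [hA, hB]
    · have h2 : 2 ≤ n := by omega
      obtain ⟨harr, hrows⟩ := hpre h2
      have hA : check n arr
          = (PySem.List.pyRange 0 n).foldl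
              (fun a i => max (max a (lineVal (rowL arr n.toNat i))) (lineVal (colL arr n i))) 1 := by
        unfold check
        have OUT : ∀ idx : List Int, (∀ i ∈ idx, 0 ≤ i ∧ i < n) → ∀ a : Int, 1 ≤ a →
            idx.foldl (fun answer i =>
              let s1 := (PySem.List.pyRange 1 n).foldl (fun (s : Int × Int) j =>
                let cnt := if PySem.List.pyGetD (PySem.List.pyGetD arr i []) j 0
                            = PySem.List.pyGetD (PySem.List.pyGetD arr i []) (j-1) 0 then s.1 + 1 else 1
                (cnt, if cnt > s.2 then cnt else s.2)) (1, answer)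
              ((PySem.List.pyRange 1 n).foldl (fun (s : Int × Int) j =>
                let cnt := if PySem.List.pyGetD (PySem.List.pyGetD arr j []) i 0
                            = PySem.List.pyGetD (PySem.List.pyGetD arr (j-1) []) i 0 then s.1 + 1 else 1
                (cnt, if cnt > s.2 then cnt else s.2)) (1, s1.2)).2) a
            = idx.foldl (fun a i =>
                max (max a (lineVal (rowL arr n.toNat i))) (lineVal (colL arr n i))) a := by
          intro idx
          induction idx with
          | nil => intro _ a _; rfl
          | cons i t ih =>
            intro hmem a ha
            have hi := hmem i List.mem_cons_self
            simp only [List.foldl_cons]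
            rw [rowInner n arr harr hrows h2 i hi.1 hi.2 a ha,
                colInner n arr h2 i (max a (lineVal (rowL arr n.toNat i)))
                  (le_trans ha (le_max_left _ _))]
            exact ih (fun x hx => hmem x (List.mem_cons_of_mem _ hx)) _
              (le_trans ha (le_trans (le_max_left _ _) (le_max_left _ _)))
        exact OUT _ (fun i hi => PySem.List.mem_pyRange_one.mp hi) 1 le_rfl
      -- the lines both sides talk about
      set rows := (PySem.List.pyRange 0 n).map (rowL arr n.toNat) with hrowsdef
      set cols := (PySem.List.pyRange 0 n).map (colL arr n) with hcolsdef
      set M := (rows ++ cols).foldl (fun b l => max b (lineVal l)) 1 with hMdef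
      haveI : RightCommutative (fun (b : Int) (l : List Int) => max b (lineVal l)) :=
        ⟨fun b x y => max_right_comm b (lineVal x) (lineVal y)⟩
      have hperm := flatMap_pair_perm (PySem.List.pyRange 0 n) (rowL arr n.toNat) (colL arr n)
      have hAM : check n arr = M := by
        rw [hA, foldl_pairmax lineVal, hperm.foldl_eq]
      have hBlines : check_alt n arr = bsearchB (rows ++ cols) 1 n := by
        unfold check_alt
        rw [if_neg (by omega)]
        show bsearchB ((PySem.List.slice arr none (some n)).map
              (fun row => PySem.List.slice row none (some n))
            ++ zipStar ((PySem.List.slice arr none (some n)).map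
              (fun row => PySem.List.slice row none (some n)))) 1 n = _
        rw [PySem.List.slice_to arr (by omega),
            List.map_congr_left (fun row (_ : row ∈ arr.take n.toNat) =>
              PySem.List.slice_to row (by omega)),
            grid_eq arr n harr, cols_eq arr n harr hrows h2]
      -- line lengths are n
      have hlinelen : ∀ l ∈ rows ++ cols, (l.length : Int) = n := by
        intro l hl
        rcases List.mem_append.mp hl with hl | hl
        · obtain ⟨i, hi, rfl⟩ := List.mem_map.mp hl
          obtain ⟨hi0, hin⟩ := PySem.List.mem_pyRange_one.mp hi
          have := rowlen arr n harr hrows i hi0 hin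
          simp only [rowL, List.length_take]
          omega
        · obtain ⟨i, _, rfl⟩ := List.mem_map.mp hl
          simp only [colL, List.length_map, PySem.List.length_pyRange_one]
          omega
      have hMge : 1 ≤ M := by
        rw [hMdef, le_foldl_lineVal_iff]
        exact Or.inl le_rfl
      have hMle : M ≤ n := by
        rw [hMdef]
        apply foldl_lineVal_le _ _ _ (by omega)
        intro l hl
        have hb1 := lineVal_le_length l
        have hb2 := hlinelen l hl
        omega
      have hf : ∀ L, 1 < L → L ≤ n → (feasibleB (rows ++ cols) L = true ↔ L ≤ M) := by
        intro L hL1 hL2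
        rw [feasible_iff _ L (by omega), hMdef, le_foldl_lineVal_iff]
        constructor
        · exact fun h => Or.inr h
        · rintro (h | h)
          · omega
          · exact h
      rw [hAM, hBlines]
      exact (bsearch_eq (rows ++ cols) M (n - 1).toNat 1 n (by omega) hMge hMle hf).symm
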